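-- pv_equiv track=rewrite | github.com/SchriderLab/permEnrichmentTest | doPermTestOnGeneList.py | getSiteToGenes
-- ===== SOURCE A (Python) =====
-- def getSiteToGenes(sites, genes, bufferDist):
--     siteToGenes = {}
--     for chrom, pos in sites:
--         siteToGenes[(chrom, pos)] = {}
--
--     for chrom, start, end, name in genes:
--         for pos in range(start-bufferDist, end+bufferDist+1):
--             if (chrom, pos) in siteToGenes:
--                 siteToGenes[(chrom, pos)][name] = 1
--
--     return siteToGenes
-- ===== SOURCE B (Python) =====
-- def getSiteToGenes(sites, genes, bufferDist):
--     result = {}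
--     for chrom, pos in dict.fromkeys(sites):
--         hits = [name for gChrom, start, end, name in genes
--                 if gChrom == chrom and start - bufferDist <= pos <= end + bufferDist]
--         result[(chrom, pos)] = dict.fromkeys(hits, 1)
--     return result
-- ===== Notes on version B (the rewrite author's own statement) =====
-- stated objective: faster
-- what changed: A enumerates every integer position of each gene's buffered interval and probes a site dict per position; B instead dedups the sites once (dict.fromkeys) and, per distinct site, filters the genes with a two-comparison interval test, so cost no longer depends on interval lengths or bufferDist.
import Mathlib
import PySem

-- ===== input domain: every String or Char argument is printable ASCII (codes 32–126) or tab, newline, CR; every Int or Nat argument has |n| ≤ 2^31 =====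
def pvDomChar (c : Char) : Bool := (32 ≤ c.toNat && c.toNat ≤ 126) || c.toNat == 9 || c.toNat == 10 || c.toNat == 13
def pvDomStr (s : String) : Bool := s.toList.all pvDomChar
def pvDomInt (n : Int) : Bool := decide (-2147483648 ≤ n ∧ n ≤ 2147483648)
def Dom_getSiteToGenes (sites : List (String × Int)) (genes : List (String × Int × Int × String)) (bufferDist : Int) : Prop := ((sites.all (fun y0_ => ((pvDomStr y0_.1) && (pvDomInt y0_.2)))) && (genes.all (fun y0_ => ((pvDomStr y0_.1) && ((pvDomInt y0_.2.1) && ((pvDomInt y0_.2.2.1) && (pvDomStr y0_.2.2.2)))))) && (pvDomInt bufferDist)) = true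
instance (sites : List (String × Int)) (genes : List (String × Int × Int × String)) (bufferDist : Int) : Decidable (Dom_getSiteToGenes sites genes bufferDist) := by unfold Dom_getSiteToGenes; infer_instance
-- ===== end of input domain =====

-- B replaces A's per-position enumeration of each buffered gene interval by an ordered dedup of the
-- sites with, per distinct site, a filtered scan of the genes (two-comparison interval test); same return value.


-- ===== PORT A =====
def getSiteToGenes (sites : List (String × Int)) (genes : List (String × Int × Int × String)) (bufferDist : Int) : List (String × Int × List (String × Int)) :=
  -- siteToGenes = {}; for chrom, pos in sites: siteToGenes[(chrom,pos)] = {}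
  let d0 : PySem.Dict (String × Int) (PySem.Dict String Int) :=
    sites.foldl (fun d s => d.insert s PySem.Dict.empty) PySem.Dict.empty
  -- for chrom, start, end, name in genes: for pos in range(start-bufferDist, end+bufferDist+1): ...
  let d1 := genes.foldl (fun d g =>
    (PySem.List.pyRange (g.2.1 - bufferDist) (g.2.2.1 + bufferDist + 1) 1).foldl
      (fun d pos =>
        if d.contains (g.1, pos) then
          d.modify (g.1, pos) PySem.Dict.empty (fun inner => inner.insert g.2.2.2 (1 : Int))
        else d) d) d0
  d1.items.map (fun p => (p.1.1, p.1.2, p.2.items))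

-- ===== PORT B =====
def getSiteToGenes_alt (sites : List (String × Int)) (genes : List (String × Int × Int × String)) (bufferDist : Int) : List (String × Int × List (String × Int)) :=
  -- for chrom, pos in dict.fromkeys(sites): hits = [name for ... if test]; result[(chrom,pos)] = dict.fromkeys(hits, 1)
  (PySem.List.dedup sites).map (fun s =>
    let hits := (genes.filter (fun g =>
      decide (g.1 = s.1 ∧ g.2.1 - bufferDist ≤ s.2 ∧ s.2 ≤ g.2.2.1 + bufferDist))).map (fun g => g.2.2.2)
    (s.1, s.2, (PySem.List.dedup hits).map (fun n => (n, (1 : Int)))))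

-- ===== PRECONDITION & SPEC =====
def Spec_getSiteToGenes (sites : List (String × Int)) (genes : List (String × Int × Int × String)) (bufferDist : Int) (out : List (String × Int × List (String × Int))) : Prop := out = getSiteToGenes_alt sites genes bufferDist
instance (sites : List (String × Int)) (genes : List (String × Int × Int × String)) (bufferDist : Int) (out : List (String × Int × List (String × Int))) : Decidable (Spec_getSiteToGenes sites genes bufferDist out) := by unfold Spec_getSiteToGenes; infer_instance

-- ===== CLAIM (what is proved, stated in full; the proofs are below) =====
def Claim_equal_getSiteToGenes : Prop := ∀ (sites : List (String × Int)) (genes : List (String × Int × Int × String)) (bufferDist : Int), Dom_getSiteToGenes sites genes bufferDist → Spec_getSiteToGenes sites genes bufferDist (getSiteToGenes sites genes bufferDist)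

-- ===== LEMMAS AND PROOFS =====

-- A's inner loop body: one position of the buffered range of gene (c, _, _, nm)
def pvStepPos (c nm : String) (d : PySem.Dict (String × Int) (PySem.Dict String Int)) (pos : Int) : PySem.Dict (String × Int) (PySem.Dict String Int) :=
  if d.contains (c, pos) then
    d.modify (c, pos) PySem.Dict.empty (fun inner => inner.insert nm (1 : Int))
  else d

theorem pvStepPos_contains (c nm : String) (d : PySem.Dict (String × Int) (PySem.Dict String Int)) (a : Int) (k : String × Int) :
    (pvStepPos c nm d a).contains k = d.contains k := by
  unfold pvStepPos
  split_ifs with h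
  · rw [PySem.Dict.contains_modify]
    by_cases hk : k = (c, a)
    · subst hk; simp [h]
    · simp [hk]
  · rfl

theorem pvStepPos_keys (c nm : String) (d : PySem.Dict (String × Int) (PySem.Dict String Int)) (a : Int) :
    (pvStepPos c nm d a).keys = d.keys := by
  unfold pvStepPos
  split_ifs with h
  · rw [PySem.Dict.keys_modify, PySem.Dict.keys_insert_of_contains d _ h]
  · rfl

theorem pvStepPos_getD (c nm : String) (d : PySem.Dict (String × Int) (PySem.Dict String Int)) (a : Int) (k : String × Int) :
    (pvStepPos c nm d a).getD k PySem.Dict.empty =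
      if k = (c, a) ∧ d.contains k = true
      then (d.getD k PySem.Dict.empty).insert nm (1 : Int)
      else d.getD k PySem.Dict.empty := by
  unfold pvStepPos
  split_ifs with h hk hk
  · rw [PySem.Dict.getD_modify, if_pos hk.1]
    rw [hk.1]
  · rw [PySem.Dict.getD_modify, if_neg]
    intro he; exact hk ⟨he, by rw [he]; exact h⟩
  · exact absurd (hk.1 ▸ hk.2) (by simp [h])
  · rfl

-- the range fold of ONE gene, seen at an arbitrary key
theorem pvRangeFold_contains (c nm : String) (b : Int) (n : ℕ) :
    ∀ (a : Int), (b - a).toNat ≤ n →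
    ∀ (d : PySem.Dict (String × Int) (PySem.Dict String Int)) (k : String × Int),
    ((PySem.List.pyRange a b 1).foldl (pvStepPos c nm) d).contains k = d.contains k := by
  induction n with
  | zero =>
    intro a h d k
    rw [PySem.List.pyRange_one_eq_nil (by omega)]
    rfl
  | succ n ih =>
    intro a h d k
    by_cases hab : b ≤ a
    · rw [PySem.List.pyRange_one_eq_nil hab]; rfl
    · rw [PySem.List.pyRange_one_cons (by omega), List.foldl_cons]
      rw [ih (a + 1) (by omega), pvStepPos_contains]

theorem pvRangeFold_keys (c nm : String) (b : Int) (n : ℕ) :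
    ∀ (a : Int), (b - a).toNat ≤ n →
    ∀ (d : PySem.Dict (String × Int) (PySem.Dict String Int)),
    ((PySem.List.pyRange a b 1).foldl (pvStepPos c nm) d).keys = d.keys := by
  induction n with
  | zero =>
    intro a h d
    rw [PySem.List.pyRange_one_eq_nil (by omega)]; rfl
  | succ n ih =>
    intro a h d
    by_cases hab : b ≤ a
    · rw [PySem.List.pyRange_one_eq_nil hab]; rfl
    · rw [PySem.List.pyRange_one_cons (by omega), List.foldl_cons]
      rw [ih (a + 1) (by omega), pvStepPos_keys]

theorem pvRangeFold_getD (c nm : String) (b : Int) (n : ℕ) :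
    ∀ (a : Int), (b - a).toNat ≤ n →
    ∀ (d : PySem.Dict (String × Int) (PySem.Dict String Int)) (k : String × Int),
    ((PySem.List.pyRange a b 1).foldl (pvStepPos c nm) d).getD k PySem.Dict.empty =
      if k.1 = c ∧ a ≤ k.2 ∧ k.2 < b ∧ d.contains k = true
      then (d.getD k PySem.Dict.empty).insert nm (1 : Int)
      else d.getD k PySem.Dict.empty := by
  induction n with
  | zero =>
    intro a h d k
    rw [PySem.List.pyRange_one_eq_nil (by omega), List.foldl_nil, if_neg]
    rintro ⟨-, h2, h3, -⟩; omega
  | succ n ih =>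
    intro a h d k
    by_cases hab : b ≤ a
    · rw [PySem.List.pyRange_one_eq_nil hab, List.foldl_nil, if_neg]
      rintro ⟨-, h2, h3, -⟩; omega
    · rw [PySem.List.pyRange_one_cons (by omega), List.foldl_cons]
      rw [ih (a + 1) (by omega), pvStepPos_contains, pvStepPos_getD]
      by_cases hk : k = (c, a)
      · have h1 : k.1 = c := by rw [hk]
        have h2 : k.2 = a := by rw [hk]
        rw [if_neg (show ¬(k.1 = c ∧ a + 1 ≤ k.2 ∧ k.2 < b ∧ d.contains k = true) by
          rintro ⟨-, hx, -, -⟩; omega)]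
        by_cases hc : d.contains k = true
        · rw [if_pos ⟨hk, hc⟩, if_pos ⟨h1, by omega, by omega, hc⟩]
        · rw [if_neg (show ¬(k = (c, a) ∧ d.contains k = true) from fun hh => hc hh.2),
            if_neg (show ¬(k.1 = c ∧ a ≤ k.2 ∧ k.2 < b ∧ d.contains k = true) from fun hh => hc hh.2.2.2)]
      · rw [if_neg (show ¬(k = (c, a) ∧ d.contains k = true) from fun hh => hk hh.1)]
        have hiff : (k.1 = c ∧ a + 1 ≤ k.2 ∧ k.2 < b ∧ d.contains k = true) ↔
            (k.1 = c ∧ a ≤ k.2 ∧ k.2 < b ∧ d.contains k = true) := by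
          constructor
          · rintro ⟨h1, h2, h3, h4⟩; exact ⟨h1, by omega, h3, h4⟩
          · rintro ⟨h1, h2, h3, h4⟩
            have : k.2 ≠ a := fun he => hk (Prod.ext h1 he)
            exact ⟨h1, by omega, h3, h4⟩
        rw [if_congr hiff rfl rfl]

-- A's per-gene step (the whole range fold of one gene)
def pvStepGene (bufferDist : Int) (d : PySem.Dict (String × Int) (PySem.Dict String Int)) (g : String × Int × Int × String) : PySem.Dict (String × Int) (PySem.Dict String Int) :=
  (PySem.List.pyRange (g.2.1 - bufferDist) (g.2.2.1 + bufferDist + 1) 1).foldl (pvStepPos g.1 g.2.2.2) d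

-- effect of one gene on the inner dict of key k (as dictated by A's range bounds)
def pvUpd (bufferDist : Int) (k : String × Int) (v : PySem.Dict String Int) (g : String × Int × Int × String) : PySem.Dict String Int :=
  if k.1 = g.1 ∧ g.2.1 - bufferDist ≤ k.2 ∧ k.2 < g.2.2.1 + bufferDist + 1
  then v.insert g.2.2.2 (1 : Int) else v

theorem pvGenesFold_keys (bufferDist : Int) (genes : List (String × Int × Int × String)) :
    ∀ (d : PySem.Dict (String × Int) (PySem.Dict String Int)),
    (genes.foldl (pvStepGene bufferDist) d).keys = d.keys := by
  induction genes with
  | nil => intro d; rfl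
  | cons g gs ih =>
    intro d
    rw [List.foldl_cons, ih]
    exact pvRangeFold_keys g.1 g.2.2.2 _ _ _ (le_refl _) d

theorem pvGenesFold_getD (bufferDist : Int) (genes : List (String × Int × Int × String)) :
    ∀ (d : PySem.Dict (String × Int) (PySem.Dict String Int)) (k : String × Int),
    d.contains k = true →
    (genes.foldl (pvStepGene bufferDist) d).getD k PySem.Dict.empty =
      genes.foldl (pvUpd bufferDist k) (d.getD k PySem.Dict.empty) := by
  induction genes with
  | nil => intro d k _; rfl
  | cons g gs ih =>
    intro d k hc
    rw [List.foldl_cons, List.foldl_cons]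
    have hc' : (pvStepGene bufferDist d g).contains k = true := by
      have hcc := pvRangeFold_contains g.1 g.2.2.2 (g.2.2.1 + bufferDist + 1)
        ((g.2.2.1 + bufferDist + 1) - (g.2.1 - bufferDist)).toNat (g.2.1 - bufferDist) (le_refl _) d k
      unfold pvStepGene
      rw [hcc]; exact hc
    rw [ih _ k hc']
    have hiff : (k.1 = g.1 ∧ g.2.1 - bufferDist ≤ k.2 ∧ k.2 < g.2.2.1 + bufferDist + 1 ∧ d.contains k = true)
        ↔ (k.1 = g.1 ∧ g.2.1 - bufferDist ≤ k.2 ∧ k.2 < g.2.2.1 + bufferDist + 1) :=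
      ⟨fun hh => ⟨hh.1, hh.2.1, hh.2.2.1⟩, fun hh => ⟨hh.1, hh.2.1, hh.2.2, hc⟩⟩
    have hstep : (pvStepGene bufferDist d g).getD k PySem.Dict.empty
        = pvUpd bufferDist k (d.getD k PySem.Dict.empty) g := by
      unfold pvStepGene pvUpd
      rw [pvRangeFold_getD g.1 g.2.2.2 (g.2.2.1 + bufferDist + 1)
        ((g.2.2.1 + bufferDist + 1) - (g.2.1 - bufferDist)).toNat (g.2.1 - bufferDist) (le_refl _) d k]
      rw [if_congr hiff rfl rfl]
    rw [hstep]

-- phase 1 of A: values stay the empty dict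
theorem pvPhase1_getD (sites : List (String × Int)) :
    ∀ (d : PySem.Dict (String × Int) (PySem.Dict String Int)) (k : String × Int),
    d.getD k PySem.Dict.empty = PySem.Dict.empty →
    (sites.foldl (fun d s => d.insert s PySem.Dict.empty) d).getD k PySem.Dict.empty = PySem.Dict.empty := by
  induction sites with
  | nil => intro d k h; exact h
  | cons s ss ih =>
    intro d k h
    rw [List.foldl_cons]
    exact ih _ k (by rw [PySem.Dict.getD_insert]; split_ifs <;> simp [h])

-- the per-gene if-update at key k equals one insert per gene of the FILTERED gene list
theorem pvUpd_fold_eq_filter (bufferDist : Int) (k : String × Int) (genes : List (String × Int × Int × String)) (acc : PySem.Dict String Int) :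
    genes.foldl (pvUpd bufferDist k) acc =
      ((genes.filter (fun g =>
          decide (g.1 = k.1 ∧ g.2.1 - bufferDist ≤ k.2 ∧ k.2 ≤ g.2.2.1 + bufferDist))).map
        (fun g => g.2.2.2)).foldl (fun nd n => nd.insert n (1 : Int)) acc := by
  rw [List.foldl_map, List.foldl_filter]
  induction genes generalizing acc with
  | nil => rfl
  | cons g gs ih =>
    rw [List.foldl_cons, List.foldl_cons, ih]
    congr 1
    unfold pvUpd
    by_cases h : k.1 = g.1 ∧ g.2.1 - bufferDist ≤ k.2 ∧ k.2 < g.2.2.1 + bufferDist + 1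
    · rw [if_pos h, if_pos (by simp only [decide_eq_true_eq]; exact ⟨h.1.symm, h.2.1, by omega⟩)]
    · rw [if_neg h, if_neg (by
        simp only [decide_eq_true_eq]
        intro hh; exact h ⟨hh.1.symm, hh.2.1, by omega⟩)]

-- a fold of inserts with constant value 1: every key present afterwards maps to 1
theorem pvFoldInsertOne_getD (ns : List String) :
    ∀ (d : PySem.Dict String Int) (n : String),
    (ns.foldl (fun nd m => nd.insert m (1 : Int)) d).getD n 0 =
      if n ∈ ns then (1 : Int) else d.getD n 0 := by
  induction ns with
  | nil => intro d n; rw [List.foldl_nil, if_neg (by simp)]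
  | cons m ms ih =>
    intro d n
    rw [List.foldl_cons, ih, PySem.Dict.getD_insert]
    by_cases hn : n ∈ ms
    · rw [if_pos hn, if_pos (List.mem_cons_of_mem _ hn)]
    · rw [if_neg hn]
      by_cases he : n = m
      · rw [if_pos (by simp [he]), if_pos (by simp [he])]
      · rw [if_neg (by simpa using he), if_neg (by simp [he, hn])]

-- items of that fold, from the empty dict: the deduped names paired with 1
theorem pvFoldInsertOne_items (ns : List String) :
    (ns.foldl (fun nd m => nd.insert m (1 : Int)) PySem.Dict.empty).items =
      (PySem.List.dedup ns).map (fun n => (n, (1 : Int))) := by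
  set d := ns.foldl (fun nd m => nd.insert m (1 : Int)) PySem.Dict.empty with hd
  have hkeys : d.keys = PySem.Set.ofList ns := by
    rw [hd, PySem.Dict.keys_foldl_insert ns (fun _ _ => (1 : Int)) PySem.Dict.empty,
      PySem.Dict.keys_empty, PySem.Set.update_nil_left]
  have hnd : d.keys.Nodup := by
    rw [hd]
    exact PySem.Dict.nodup_keys_foldl_insert ns (fun _ _ => (1 : Int)) _ (by simp)
  rw [PySem.Dict.items_eq_map_keys d hnd 0, hkeys, PySem.List.dedup_eq_ofList]
  apply List.map_congr_left
  intro n hn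
  have hns : n ∈ ns := (PySem.Set.mem_ofList ns n).mp hn
  rw [hd, pvFoldInsertOne_getD, if_pos hns]

-- ===== VERDICT (by name: the statement is the Claim_ definition above) =====
theorem getSiteToGenes_spec : Claim_equal_getSiteToGenes := by
  intro sites genes bufferDist _
  show getSiteToGenes sites genes bufferDist = getSiteToGenes_alt sites genes bufferDist
  show (genes.foldl (pvStepGene bufferDist)
        (sites.foldl (fun d s => d.insert s PySem.Dict.empty) PySem.Dict.empty)).items.map
      (fun p => (p.1.1, p.1.2, p.2.items))
    = getSiteToGenes_alt sites genes bufferDist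
  set d0 : PySem.Dict (String × Int) (PySem.Dict String Int) :=
    sites.foldl (fun d s => d.insert s PySem.Dict.empty) PySem.Dict.empty with hd0
  set dA := genes.foldl (pvStepGene bufferDist) d0 with hdA
  have hk0 : d0.keys = PySem.Set.ofList sites := by
    rw [hd0, PySem.Dict.keys_foldl_insert sites (fun _ _ => PySem.Dict.empty) PySem.Dict.empty,
      PySem.Dict.keys_empty, PySem.Set.update_nil_left]
  have hnd0 : d0.keys.Nodup := by
    rw [hd0]
    exact PySem.Dict.nodup_keys_foldl_insert sites (fun _ _ => PySem.Dict.empty) _ (by simp)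
  have hkA : dA.keys = d0.keys := pvGenesFold_keys bufferDist genes d0
  rw [PySem.Dict.items_eq_map_keys dA (hkA ▸ hnd0) PySem.Dict.empty, List.map_map,
    hkA, hk0]
  unfold getSiteToGenes_alt
  rw [PySem.List.dedup_eq_ofList]
  apply List.map_congr_left
  intro k hkmem
  have hkd0 : d0.contains k = true := by
    rw [PySem.Dict.contains_iff_mem_keys, hk0]; exact hkmem
  have hAval : dA.getD k PySem.Dict.empty = genes.foldl (pvUpd bufferDist k) PySem.Dict.empty := by
    rw [hdA, pvGenesFold_getD bufferDist genes d0 k hkd0, pvPhase1_getD sites PySem.Dict.empty k (by simp)]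
  show (k.1, k.2, (dA.getD k PySem.Dict.empty).items) = _
  rw [hAval, pvUpd_fold_eq_filter, pvFoldInsertOne_items]
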